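-- pv_equiv track=rewrite | github.com/Walingar/GitAlsoProject | python/git_also/data_set.py | _create_dict_of_commits
-- ===== SOURCE A (Python) =====
-- def _create_dict_of_commits(index, start_learn_time, end_learn_time):
--     commits = {}
--     for first_file, files in index.items():
--         for time in files["count"]:
--             if start_learn_time <= time <= end_learn_time:
--                 commits.setdefault(time, [])
--                 commits[time].append(first_file)
--     return dict(filter(lambda x: len(x[1]) >= 2, commits.items()))
-- ===== SOURCE B (Python) =====
-- def _create_dict_of_commits(index, start_learn_time, end_learn_time):
--     # flatten to (time, first_file) pairs in iteration order
--     pairs = [(time, first_file)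
--              for first_file, files in index.items()
--              for time in files["count"]
--              if start_learn_time <= time <= end_learn_time]
--     # counting pass: how many files share each time
--     counts = {}
--     for time, _ in pairs:
--         counts[time] = counts.get(time, 0) + 1
--     # build only the groups that qualify (>= 2 members)
--     result = {}
--     for time, first_file in pairs:
--         if counts[time] >= 2:
--             result.setdefault(time, [])
--             result[time].append(first_file)
--     return result
-- ===== Notes on version B (the rewrite author's own statement) =====
-- stated objective: alternative
-- what changed: Replaces aggregate-all-groups-then-filter over the nested structure with a flattened (time,file) pair list, a separate counting pass, and a rebuild loop that only ever creates groups with >= 2 members.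
import Mathlib
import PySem

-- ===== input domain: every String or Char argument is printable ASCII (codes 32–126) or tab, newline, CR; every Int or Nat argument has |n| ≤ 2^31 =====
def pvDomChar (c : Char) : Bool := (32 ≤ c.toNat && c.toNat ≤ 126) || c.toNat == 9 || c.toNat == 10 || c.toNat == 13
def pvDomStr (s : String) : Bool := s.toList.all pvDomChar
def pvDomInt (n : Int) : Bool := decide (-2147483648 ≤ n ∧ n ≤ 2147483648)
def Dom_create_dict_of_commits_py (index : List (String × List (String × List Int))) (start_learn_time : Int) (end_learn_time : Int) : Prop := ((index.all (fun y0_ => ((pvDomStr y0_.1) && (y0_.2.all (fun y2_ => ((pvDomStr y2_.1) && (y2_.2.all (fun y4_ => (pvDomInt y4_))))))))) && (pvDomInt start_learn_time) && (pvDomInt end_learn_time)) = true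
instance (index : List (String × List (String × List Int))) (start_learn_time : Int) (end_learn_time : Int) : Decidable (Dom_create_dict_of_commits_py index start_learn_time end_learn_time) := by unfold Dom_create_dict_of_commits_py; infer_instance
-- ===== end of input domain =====

-- B flattens to (time, file) pairs, counts times in one pass, then rebuilds only the groups
-- with at least two members, instead of A's aggregate-everything-then-filter (return value only).

-- ===== PORT A =====
def create_dict_of_commits_py (index : List (String × List (String × List Int))) (start_learn_time : Int) (end_learn_time : Int) : List (Int × List String) :=
  let commits : PySem.Dict Int (List String) :=
    index.foldl (fun commits p =>
      ((PySem.Dict.ofList p.2).getD "count" []).foldl (fun commits time =>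
        if start_learn_time ≤ time ∧ time ≤ end_learn_time then
          let c1 := commits.setdefault time []
          c1.insert time (c1.getD time [] ++ [p.1])
        else commits) commits) PySem.Dict.empty
  commits.items.filter (fun x => decide (2 ≤ x.2.length))

-- ===== PORT B =====
-- Source B's locals as helpers: the flattened pair list and the counting pass
def pvPairsB (index : List (String × List (String × List Int))) (start_learn_time : Int) (end_learn_time : Int) : List (Int × String) :=
  index.flatMap (fun p =>
    (((PySem.Dict.ofList p.2).getD "count" []).filter
      (fun t => decide (start_learn_time ≤ t ∧ t ≤ end_learn_time))).map (fun t => (t, p.1)))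

def pvCountsB (pairs : List (Int × String)) : PySem.Dict Int Int :=
  pairs.foldl (fun c q => c.insert q.1 (c.getD q.1 0 + 1)) PySem.Dict.empty

def create_dict_of_commits_py_alt (index : List (String × List (String × List Int))) (start_learn_time : Int) (end_learn_time : Int) : List (Int × List String) :=
  ((pvPairsB index start_learn_time end_learn_time).foldl (fun r q =>
      if 2 ≤ (pvCountsB (pvPairsB index start_learn_time end_learn_time)).getD q.1 0 then
        (r.setdefault q.1 []).insert q.1 ((r.setdefault q.1 []).getD q.1 [] ++ [q.2])
      else r) PySem.Dict.empty).items

-- ===== PRECONDITION & SPEC =====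
-- Pre_ excludes exactly the inputs on which Python A raises KeyError: an entry whose dict lacks the "count" key.
def Pre_create_dict_of_commits_py (index : List (String × List (String × List Int))) (start_learn_time : Int) (end_learn_time : Int) : Prop :=
  ∀ p ∈ index, (PySem.Dict.ofList p.2).contains "count" = true
instance (index : List (String × List (String × List Int))) (start_learn_time : Int) (end_learn_time : Int) : Decidable (Pre_create_dict_of_commits_py index start_learn_time end_learn_time) := by unfold Pre_create_dict_of_commits_py; infer_instance
def pvWitness_create_dict_of_commits_py : (List (String × List (String × List Int))) × Int × Int :=
  ([("a", [("count", [1, 1, 3])]), ("b", [("count", [1, 7])])], 0, 5)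
def Spec_create_dict_of_commits_py (index : List (String × List (String × List Int))) (start_learn_time : Int) (end_learn_time : Int) (out : List (Int × List String)) : Prop := out = create_dict_of_commits_py_alt index start_learn_time end_learn_time
instance (index : List (String × List (String × List Int))) (start_learn_time : Int) (end_learn_time : Int) (out : List (Int × List String)) : Decidable (Spec_create_dict_of_commits_py index start_learn_time end_learn_time out) := by unfold Spec_create_dict_of_commits_py; infer_instance

-- ===== CLAIM (what is proved, stated in full; the proofs are below) =====
def Claim_equal_create_dict_of_commits_py : Prop := ∀ (index : List (String × List (String × List Int))) (start_learn_time : Int) (end_learn_time : Int), Dom_create_dict_of_commits_py index start_learn_time end_learn_time → Pre_create_dict_of_commits_py index start_learn_time end_learn_time → Spec_create_dict_of_commits_py index start_learn_time end_learn_time (create_dict_of_commits_py index start_learn_time end_learn_time)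

-- ===== LEMMAS AND PROOFS =====

-- the flattened (time, file) pair list both programs effectively process
def pairsOf (index : List (String × List (String × List Int))) (s e : Int) : List (Int × String) :=
  index.flatMap (fun p =>
    (((PySem.Dict.ofList p.2).getD "count" []).filter (fun t => decide (s ≤ t ∧ t ≤ e))).map (fun t => (t, p.1)))

-- the common aggregation: group pairs by their time, in insertion order
def aggP (P : List (Int × String)) : PySem.Dict Int (List String) :=
  P.foldl (fun d q => d.modify q.1 [] (· ++ [q.2])) PySem.Dict.empty

def grpP (t : Int) (P : List (Int × String)) : List String :=
  (P.filter (fun q => q.1 == t)).map (·.2)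

theorem agg_step_eq_modify (d : PySem.Dict Int (List String)) (t : Int) (f : String) :
    (d.setdefault t []).insert t ((d.setdefault t []).getD t [] ++ [f]) = d.modify t [] (· ++ [f]) := by
  by_cases h : d.contains t = true
  · rw [PySem.Dict.setdefault_of_contains d [] h]
    rw [show d.modify t [] (· ++ [f]) = d.insert t (d.getD t [] ++ [f]) from PySem.Dict.ext_iff.mpr rfl]
  · rw [PySem.Dict.setdefault_of_not_contains d [] (by simpa using h)]
    rw [show d.modify t [] (· ++ [f]) = d.insert t (d.getD t [] ++ [f]) from PySem.Dict.ext_iff.mpr rfl]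
    rw [PySem.Dict.getD_insert_self, PySem.Dict.getD_of_not_contains (h := by simpa using h),
      PySem.Dict.insert_insert_self]

theorem foldl_flatMap' {α β γ : Type} (g : γ → β → γ) (h : α → List β) (l : List α) (d : γ) :
    (l.flatMap h).foldl g d = l.foldl (fun d x => (h x).foldl g d) d := by
  induction l generalizing d with
  | nil => rfl
  | cons a l ih => simp [List.flatMap_cons, List.foldl_append, ih]

-- A's inner loop, rewritten as an aggregation over the pairs it contributes
theorem innerA_eq (s e : Int) (d : PySem.Dict Int (List String)) (p : String × List (String × List Int)) :
    ((PySem.Dict.ofList p.2).getD "count" []).foldl (fun commits time =>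
        if s ≤ time ∧ time ≤ e then
          (commits.setdefault time []).insert time ((commits.setdefault time []).getD time [] ++ [p.1])
        else commits) d
      = ((((PySem.Dict.ofList p.2).getD "count" []).filter
            (fun t => decide (s ≤ t ∧ t ≤ e))).map (fun t => (t, p.1))).foldl
          (fun d q => d.modify q.1 [] (· ++ [q.2])) d := by
  rw [List.foldl_map, ← PySem.List.foldl_ite_eq_foldl_filter (p := fun t => s ≤ t ∧ t ≤ e)]
  simp only [agg_step_eq_modify]

-- A computes: aggregate everything, filter the items afterwards
theorem portA_eq (index : List (String × List (String × List Int))) (s e : Int) :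
    create_dict_of_commits_py index s e
      = (aggP (pairsOf index s e)).items.filter (fun x => decide (2 ≤ x.2.length)) := by
  unfold create_dict_of_commits_py aggP pairsOf
  rw [foldl_flatMap']
  exact congrArg
    (fun F : PySem.Dict Int (List String) → (String × List (String × List Int)) → PySem.Dict Int (List String) =>
      List.filter (fun x => decide (2 ≤ x.2.length)) (List.foldl F PySem.Dict.empty index).items)
    (funext fun d => funext fun p => innerA_eq s e d p)

-- B computes: aggregate only the pairs whose time occurs at least twice
theorem counts_getD (P : List (Int × String)) (t : Int) :
    (pvCountsB P).getD t 0 = ((P.map Prod.fst).count t : Int) := by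
  unfold pvCountsB
  rw [← List.foldl_map (f := Prod.fst)
    (g := fun (c : PySem.Dict Int Int) (t : Int) => c.insert t (c.getD t 0 + 1))]
  rw [PySem.Dict.getD_foldl_insert_add_one]
  simp

theorem portB_eq (index : List (String × List (String × List Int))) (s e : Int) :
    create_dict_of_commits_py_alt index s e
      = (aggP ((pairsOf index s e).filter
          (fun q => decide (2 ≤ ((pairsOf index s e).map Prod.fst).count q.1)))).items := by
  unfold create_dict_of_commits_py_alt aggP
  have hp : pvPairsB index s e = pairsOf index s e := rfl
  rw [hp]
  simp only [counts_getD, agg_step_eq_modify]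
  rw [PySem.List.foldl_ite_eq_foldl_filter
    (p := fun q : Int × String => 2 ≤ (((pairsOf index s e).map Prod.fst).count q.1 : Int))]
  congr 2
  apply List.filter_congr
  intro q _
  simp only [decide_eq_decide]
  omega

theorem add_filter {α : Type} [DecidableEq α] (q : α → Bool) (s : List α) (a : α) :
    (PySem.Set.add s a).filter q = if q a then PySem.Set.add (s.filter q) a else s.filter q := by
  rw [PySem.Set.add_eq_ite, PySem.Set.add_eq_ite]
  by_cases hm : a ∈ s <;> by_cases hq : q a = true <;>
    simp [hm, hq, List.filter_append, List.mem_filter]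

theorem ofList_foldl_filter {α : Type} [DecidableEq α] (q : α → Bool) (ks : List α) (s : List α) :
    ((ks.filter q).foldl PySem.Set.add (s.filter q)) = (ks.foldl PySem.Set.add s).filter q := by
  induction ks generalizing s with
  | nil => rfl
  | cons a ks ih =>
    by_cases hq : q a = true
    · simp only [List.filter_cons, hq, if_pos, List.foldl_cons]
      rw [show PySem.Set.add (s.filter q) a = (PySem.Set.add s a).filter q by
        rw [add_filter]; simp [hq]]
      exact ih _
    · simp only [List.filter_cons, hq]
      simp only [Bool.false_eq_true, if_false, List.foldl_cons]
      rw [show s.filter q = (PySem.Set.add s a).filter q by rw [add_filter]; simp [hq]]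
      exact ih _

theorem dedup_filter {α : Type} [DecidableEq α] (q : α → Bool) (ks : List α) :
    PySem.List.dedup (ks.filter q) = (PySem.List.dedup ks).filter q := by
  simp only [PySem.List.dedup_eq_ofList, PySem.Set.ofList_eq_foldl]
  simpa using ofList_foldl_filter q ks []

-- canonical form of the aggregated dict's items
theorem items_aggP (P : List (Int × String)) :
    (aggP P).items = (PySem.List.dedup (P.map Prod.fst)).map (fun t => (t, grpP t P)) := by
  unfold aggP
  have hn : (P.foldl (fun d q => d.modify q.1 [] (· ++ [q.2])) PySem.Dict.empty).keys.Nodup :=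
    PySem.Dict.nodup_keys_foldl_modify_key (key := Prod.fst) (d0 := [])
      (f := fun d q => (· ++ [q.2])) (d := PySem.Dict.empty) (h := PySem.Dict.nodup_keys_empty) (l := P)
  rw [PySem.Dict.items_eq_map_keys _ hn []]
  rw [PySem.Dict.keys_foldl_modify_key]
  rw [PySem.Dict.keys_empty, PySem.Set.update_nil_left, ← PySem.List.dedup_eq_ofList]
  apply List.map_congr_left
  intro t _
  rw [PySem.Dict.getD_foldl_modify_append, PySem.Dict.getD_empty]
  simp [grpP]

theorem length_grpP (t : Int) (P : List (Int × String)) :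
    (grpP t P).length = (P.map Prod.fst).count t := by
  simp [grpP, List.count, ← List.countP_eq_length_filter, List.countP_map, Function.comp_def]

-- the heart: filtering small groups afterwards = never building them
theorem main_filter (P : List (Int × String)) :
    (aggP P).items.filter (fun x => decide (2 ≤ x.2.length))
      = (aggP (P.filter (fun q => decide (2 ≤ (P.map Prod.fst).count q.1)))).items := by
  rw [items_aggP, items_aggP]
  rw [List.filter_map]
  simp only [Function.comp_def, length_grpP]
  have hmap : (P.filter (fun q => decide (2 ≤ (P.map Prod.fst).count q.1))).map Prod.fst
      = (P.map Prod.fst).filter (fun t => decide (2 ≤ (P.map Prod.fst).count t)) := by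
    rw [List.filter_map]; rfl
  rw [hmap, ← dedup_filter, dedup_filter]
  apply List.map_congr_left
  intro t ht
  have hpt : decide (2 ≤ (P.map Prod.fst).count t) = true := (List.mem_filter.mp ht).2
  have hgrp : grpP t (P.filter (fun q => decide (2 ≤ (P.map Prod.fst).count q.1))) = grpP t P := by
    unfold grpP
    rw [List.filter_filter]
    congr 1
    apply List.filter_congr
    intro q _
    by_cases h : q.1 = t
    · simp [h, hpt]
    · simp [h]
  rw [hgrp]

-- ===== VERDICT (by name: the statement is the Claim_ definition above) =====
theorem create_dict_of_commits_py_spec : Claim_equal_create_dict_of_commits_py := by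
  intro index s e _ _
  unfold Spec_create_dict_of_commits_py
  rw [portA_eq, portB_eq, main_filter]
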